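-- pv_equiv track=rewrite | github.com/alokhina/urop_fall_2017 | scr_parser.py | create_phrases
-- ===== SOURCE A (Python) =====
-- def delete_whitespaces_and_punctuation_marks(line):
--     i=0
--
--     if line == "":
--         return line
--     clear_line = line
--     while clear_line[0] == ' ':
--         clear_line = clear_line[1:]
--         if clear_line == "":
--             return line
--
--     i = len(clear_line)-1
--     while clear_line[i] == ' ' or clear_line[i] == '\n' or clear_line[i] == '.' or clear_line[i] == '!' or clear_line[i] == '\r' and clear_line[i] == '\t':
--         clear_line = clear_line[0:i]
--         if clear_line == "":
--             return line
--         i -= 1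
--     if clear_line[-1] == ' ':
--         clear_line = clear_line[:len(clear_line)-2]
--     return clear_line
--
-- def create_phrases(scene):
--     lines = scene.split('\n')
--     curr_character = None
--     curr_phrase = ""
--     characters = set()
--     characters_phrases = []
--     number = 0
--     name = None
--     number_of_d = 0
--     is_new_dialogue = 1
--     for line in lines:
--         if (len(line) > 0 and line[0] == 'C'):
--             number += 1
--             if name is not None:
--                 characters_phrases.append((name, curr_phrase, number_of_d))
--             name = extract_name(line)
--             curr_phrase = ""
--             is_new_dialogue = 1
--         elif (len(line) > 0):
--             if line[0] == 'D':
--                 number_of_d += is_new_dialogue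
--                 is_new_dialogue = 0
--                 curr_phrase += line[7:]
--     if name is not None:
--         characters_phrases.append((name, curr_phrase, number_of_d))
--     return characters_phrases
--
-- def extract_name(line):
--     clear_line = delete_whitespaces_and_punctuation_marks(line[7:])
--     i = 0
--     while (i < len(clear_line) and clear_line[i] != '('):
--         i += 1
--     name = clear_line[0:i]
--     return name
-- ===== SOURCE B (Python) =====
-- def delete_whitespaces_and_punctuation_marks(line):
--     i=0
--
--     if line == "":
--         return line
--     clear_line = line
--     while clear_line[0] == ' ':
--         clear_line = clear_line[1:]
--         if clear_line == "":
--             return line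
--
--     i = len(clear_line)-1
--     while clear_line[i] == ' ' or clear_line[i] == '\n' or clear_line[i] == '.' or clear_line[i] == '!' or clear_line[i] == '\r' and clear_line[i] == '\t':
--         clear_line = clear_line[0:i]
--         if clear_line == "":
--             return line
--         i -= 1
--     if clear_line[-1] == ' ':
--         clear_line = clear_line[:len(clear_line)-2]
--     return clear_line
--
-- def extract_name(line):
--     clear_line = delete_whitespaces_and_punctuation_marks(line[7:])
--     i = 0
--     while (i < len(clear_line) and clear_line[i] != '('):
--         i += 1
--     name = clear_line[0:i]
--     return name
--
-- def create_phrases(scene):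
--     lines = scene.split('\n')
--     n = len(lines)
--     # skip everything before the first 'C' line; a 'D' line in that prefix
--     # still bumps the running counter once
--     i = 0
--     prefix_has_d = False
--     while i < n and not lines[i].startswith('C'):
--         if lines[i].startswith('D'):
--             prefix_has_d = True
--         i += 1
--     count = 1 if prefix_has_d else 0
--     result = []
--     # each block starts at a 'C' header line
--     while i < n:
--         header = lines[i]
--         i += 1
--         parts = []
--         while i < n and not lines[i].startswith('C'):
--             if lines[i].startswith('D'):
--                 parts.append(lines[i][7:])
--             i += 1
--         if parts:
--             count += 1
--         result.append((extract_name(header), "".join(parts), count))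
--     return result
-- ===== Notes on version B (the rewrite author's own statement) =====
-- stated objective: alternative
-- what changed: Replaces A's single-pass state machine (threading curr_phrase/name/is_new_dialogue flags across all lines) with a block decomposition: skip the prefix before the first character-header line, then cut the lines into blocks at header lines and emit one tuple per block, threading only the running dialogue counter.
import Mathlib
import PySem

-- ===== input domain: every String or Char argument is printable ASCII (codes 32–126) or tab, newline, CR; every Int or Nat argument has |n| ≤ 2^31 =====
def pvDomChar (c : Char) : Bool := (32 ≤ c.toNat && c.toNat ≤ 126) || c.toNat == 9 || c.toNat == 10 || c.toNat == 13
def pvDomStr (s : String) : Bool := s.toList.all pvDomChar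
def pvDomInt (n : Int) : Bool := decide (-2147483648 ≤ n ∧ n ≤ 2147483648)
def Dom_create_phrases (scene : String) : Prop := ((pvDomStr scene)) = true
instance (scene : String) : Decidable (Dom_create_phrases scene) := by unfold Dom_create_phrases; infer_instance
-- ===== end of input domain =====

-- B replaces A's single-pass state machine (name/phrase/flag state threaded over lines)
-- by a block decomposition: split the lines at 'C' headers and emit one tuple per block,
-- threading only a running counter; same asymptotic cost ("alternative", not faster).

-- ===== SHARED HELPERS (delete_whitespaces_and_punctuation_marks / extract_name:
-- identical helper functions in both Python sources, ported once over List Char) =====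

-- while clear_line[0] == ' ': clear_line = clear_line[1:]; if clear_line == "": return line
-- `none` encodes the early `return line`; the [] case is unreachable (guarded by the empty-return)
def pvLeadLoop : List Char → Option (List Char)
  | [] => some []
  | c :: rest => if c = ' ' then (if rest = [] then none else pvLeadLoop rest) else some (c :: rest)

-- the loop condition, verbatim including Python's `or … and …` precedence on the last clause
def pvTrailCond (c : Char) : Bool :=
  c == ' ' || c == '\n' || c == '.' || c == '!' || (c == '\r' && c == '\t')

-- while <cond on clear_line[i]>: clear_line = clear_line[0:i]; if "": return line; i -= 1
-- (invariant i = len(clear_line) - 1, so the loop strips the last character)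
def pvTrailLoop (cl : List Char) : Option (List Char) :=
  if h : cl = [] then some []
  else if pvTrailCond (cl.getLast h) then
    (if cl.dropLast = [] then none else pvTrailLoop cl.dropLast)
  else some cl
termination_by cl.length
decreasing_by
  have : cl.dropLast.length = cl.length - 1 := List.length_dropLast
  have : cl ≠ [] := h
  have : 0 < cl.length := List.length_pos_iff.mpr h
  omega

def delete_whitespaces_and_punctuation_marks (line : List Char) : List Char :=
  if line = [] then line
  else match pvLeadLoop line with
  | none => line
  | some cl =>
    match pvTrailLoop cl with
    | none => line
    | some cl2 =>
      -- if clear_line[-1] == ' ': clear_line = clear_line[:len(clear_line)-2]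
      if cl2.getLast? = some ' ' then cl2.take (cl2.length - 2) else cl2

-- i = 0; while (i < len(clear_line) and clear_line[i] != '('): i += 1
def pvNameLen (cl : List Char) (i : Nat) : Nat :=
  if h : i < cl.length then (if cl[i] = '(' then i else pvNameLen cl (i + 1)) else i
termination_by cl.length - i

def extract_name (line : List Char) : String :=
  let cl := delete_whitespaces_and_punctuation_marks (PySem.List.slice line (some 7) none)
  String.ofList (cl.take (pvNameLen cl 0))

-- line[7:]
def pvS7 (line : List Char) : List Char := PySem.List.slice line (some 7) none

-- ===== PORT A =====
-- the for-loop over lines; state = (curr_phrase, name, number, number_of_d, is_new_dialogue)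
-- (curr_character and the set `characters` are initialized in A but never used; not carried)
def pvALoop : List (List Char) → List Char → Option String → Int → Int → Int →
    List (String × String × Int)
  | [], cp, name, _num, nd, _ind =>
      match name with
      | some nm => [(nm, String.ofList cp, nd)]
      | none => []
  | line :: rest, cp, name, num, nd, ind =>
      if 0 < PySem.List.len line ∧ PySem.List.pyGet? line 0 = some 'C' then
        (match name with
         | some nm => [(nm, String.ofList cp, nd)]
         | none => []) ++ pvALoop rest [] (some (extract_name line)) (num + 1) nd 1
      else if 0 < PySem.List.len line then
        if PySem.List.pyGet? line 0 = some 'D' then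
          pvALoop rest (cp ++ pvS7 line) name num (nd + ind) 0
        else pvALoop rest cp name num nd ind
      else pvALoop rest cp name num nd ind

def create_phrases (scene : String) : List (String × String × Int) :=
  let lines := PySem.Chars.splitOn scene.toList ['\n']
  pvALoop lines [] none 0 0 1

-- ===== PORT B =====
def pvIsC (l : List Char) : Bool := PySem.Chars.startswith l ['C']
def pvIsD (l : List Char) : Bool := PySem.Chars.startswith l ['D']

-- first while: skip prefix before the first 'C' header, noting whether it had a 'D' line
def pvPreLoop : List (List Char) → Bool → Bool × List (List Char)
  | [], pd => (pd, [])
  | l :: rest, pd => if pvIsC l then (pd, l :: rest) else pvPreLoop rest (pd || pvIsD l)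

-- inner while: collect parts of one block and the remaining lines
def pvInnerLoop : List (List Char) → List (List Char) → List (List Char) × List (List Char)
  | [], parts => (parts, [])
  | l :: rest, parts =>
      if pvIsC l then (parts, l :: rest)
      else pvInnerLoop rest (if pvIsD l then parts ++ [pvS7 l] else parts)

theorem pvInnerLoop_snd_le :
    ∀ (rest acc : List (List Char)), (pvInnerLoop rest acc).2.length ≤ rest.length := by
  intro rest
  induction rest with
  | nil => intro acc; simp [pvInnerLoop]
  | cons l rest ih =>
      intro acc
      by_cases h : pvIsC l = true
      · simp [pvInnerLoop, h]
      · simp only [pvInnerLoop, h, if_false, Bool.false_eq_true]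
        exact le_trans (ih _) (by simp)

-- outer while: one tuple per block headed by a 'C' line
def pvBlockLoop : List (List Char) → Int → List (String × String × Int)
  | [], _ => []
  | header :: rest, count =>
      let p := pvInnerLoop rest []
      let count2 := if p.1 = [] then count else count + 1
      (extract_name header, String.ofList (PySem.Chars.join [] p.1), count2) ::
        pvBlockLoop p.2 count2
termination_by l => l.length
decreasing_by
  have := pvInnerLoop_snd_le rest []
  simpa using Nat.lt_succ_of_le this

def create_phrases_alt (scene : String) : List (String × String × Int) :=
  let lines := PySem.Chars.splitOn scene.toList ['\n']
  let p := pvPreLoop lines false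
  pvBlockLoop p.2 (if p.1 then 1 else 0)

-- ===== PRECONDITION & SPEC =====
def Spec_create_phrases (scene : String) (out : List (String × String × Int)) : Prop := out = create_phrases_alt scene
instance (scene : String) (out : List (String × String × Int)) : Decidable (Spec_create_phrases scene out) := by unfold Spec_create_phrases; infer_instance

-- ===== CLAIM (what is proved, stated in full; the proofs are below) =====
def Claim_equal_create_phrases : Prop := ∀ (scene : String), Dom_create_phrases scene → Spec_create_phrases scene (create_phrases scene)

-- ===== LEMMAS AND PROOFS =====

-- A's guard `len(line) > 0 and line[0] == c` is B's startswith for a one-character prefix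
theorem pv_head_startswith (l : List Char) (c : Char) :
    (0 < PySem.List.len l ∧ PySem.List.pyGet? l 0 = some c) ↔
      PySem.Chars.startswith l [c] = true := by
  rw [PySem.Chars.startswith_iff]
  cases l with
  | nil => simp [PySem.List.len, PySem.List.pyGet?]
  | cons a t =>
      simp [PySem.List.len_eq, List.cons_prefix_cons, eq_comm]

theorem pv_join_nil_cons (a : List Char) (l : List (List Char)) :
    PySem.Chars.join [] (a :: l) = a ++ PySem.Chars.join [] l := by
  cases l with
  | nil => simp [PySem.Chars.join_singleton, PySem.Chars.join_nil]
  | cons b r => rw [PySem.Chars.join_cons_cons]; simp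

theorem pvInnerLoop_spec (rest : List (List Char)) :
    ∀ acc, pvInnerLoop rest acc =
      (acc ++ ((rest.takeWhile (fun l => !pvIsC l)).filter pvIsD).map pvS7,
       rest.dropWhile (fun l => !pvIsC l)) := by
  induction rest with
  | nil => intro acc; simp [pvInnerLoop]
  | cons l rest ih =>
      intro acc
      by_cases h : pvIsC l = true
      · simp [pvInnerLoop, h, List.takeWhile_cons, List.dropWhile_cons]
      · have h' : pvIsC l = false := by simpa using h
        by_cases hd : pvIsD l = true
        · simp [pvInnerLoop, h', hd, ih, List.takeWhile_cons, List.dropWhile_cons,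
            List.filter_cons]
        · have hd' : pvIsD l = false := by simpa using hd
          simp [pvInnerLoop, h', hd', ih, List.takeWhile_cons, List.dropWhile_cons,
            List.filter_cons]

theorem pvPreLoop_spec (lines : List (List Char)) :
    ∀ pd, pvPreLoop lines pd =
      (pd || (lines.takeWhile (fun l => !pvIsC l)).any pvIsD,
       lines.dropWhile (fun l => !pvIsC l)) := by
  induction lines with
  | nil => intro pd; simp [pvPreLoop]
  | cons l rest ih =>
      intro pd
      by_cases h : pvIsC l = true
      · simp [pvPreLoop, h, List.takeWhile_cons, List.dropWhile_cons]
      · have h' : pvIsC l = false := by simpa using h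
        simp [pvPreLoop, h', ih, List.takeWhile_cons, List.dropWhile_cons, Bool.or_assoc]

-- main invariant: once a name is current (is_new_dialogue = ind, running total = nd),
-- A's remaining fold emits the current block's tuple and then agrees with B's block loop
theorem pvALoop_some (lines : List (List Char)) :
    ∀ (cp : List Char) (nm : String) (num nd ind : Int),
      pvALoop lines cp (some nm) num nd ind =
        (let ds := (lines.takeWhile (fun l => !pvIsC l)).filter pvIsD
         let nd' := nd + (if ds = [] then 0 else ind)
         (nm, String.ofList (cp ++ PySem.Chars.join [] (ds.map pvS7)), nd') ::
           pvBlockLoop (lines.dropWhile (fun l => !pvIsC l)) nd') := by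
  induction lines with
  | nil =>
      intro cp nm num nd ind
      simp [pvALoop, pvBlockLoop, PySem.Chars.join_nil]
  | cons l rest ih =>
      intro cp nm num nd ind
      by_cases hc : pvIsC l = true
      · have hg : 0 < PySem.List.len l ∧ PySem.List.pyGet? l 0 = some 'C' :=
          (pv_head_startswith l 'C').mpr hc
        simp only [pvALoop, if_pos hg, ih, List.takeWhile_cons, List.dropWhile_cons, hc,
          Bool.not_true, Bool.false_eq_true, if_false, List.filter_nil]
        rw [pvBlockLoop]
        simp only [pvInnerLoop_spec rest [], List.nil_append, PySem.Chars.join_nil]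
        simp only [List.map_eq_nil_iff]
        split_ifs <;> simp [List.singleton_append]
      · have hc' : ¬ (0 < PySem.List.len l ∧ PySem.List.pyGet? l 0 = some 'C') := by
          rw [pv_head_startswith]; simpa [pvIsC] using hc
        by_cases hd : pvIsD l = true
        · have hg : 0 < PySem.List.len l ∧ PySem.List.pyGet? l 0 = some 'D' :=
            (pv_head_startswith l 'D').mpr hd
        -- the D branch: consumes the line into cp, bumps nd by ind, zeroes ind
          simp only [pvALoop, if_neg hc', if_pos hg.1, if_pos hg.2, ih, List.takeWhile_cons,
            hc, Bool.not_false, if_true, List.dropWhile_cons, List.filter_cons, hd]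
          simp only [Bool.false_eq_true, if_false, ite_true, List.map_cons, pv_join_nil_cons,
            reduceCtorEq, List.cons_ne_nil]
          split_ifs <;> simp [List.append_assoc] <;> ring_nf
        · have hd' : pvIsD l = false := by simpa using hd
          have hgd : ¬ PySem.List.pyGet? l 0 = some 'D' ∨ ¬ 0 < PySem.List.len l := by
            by_cases hl : 0 < PySem.List.len l
            · left; intro hh; exact absurd ((pv_head_startswith l 'D').mp ⟨hl, hh⟩) hd
            · right; exact hl
          have step : pvALoop (l :: rest) cp (some nm) num nd ind =
              pvALoop rest cp (some nm) num nd ind := by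
            simp only [pvALoop]
            split_ifs <;> first | rfl | tauto
          rw [step, ih]
          simp [List.takeWhile_cons, hc, List.dropWhile_cons, List.filter_cons, hd']
  termination_by l => l.length

-- before the first 'C' header A emits nothing, but a 'D' line there still bumps the counter
theorem pvALoop_none (lines : List (List Char)) :
    ∀ (cp : List Char) (num nd ind : Int),
      pvALoop lines cp none num nd ind =
        (let ds := (lines.takeWhile (fun l => !pvIsC l)).filter pvIsD
         pvBlockLoop (lines.dropWhile (fun l => !pvIsC l))
           (nd + (if ds = [] then 0 else ind))) := by
  induction lines with
  | nil => intro cp num nd ind; simp [pvALoop, pvBlockLoop]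
  | cons l rest ih =>
      intro cp num nd ind
      by_cases hc : pvIsC l = true
      · have hg : 0 < PySem.List.len l ∧ PySem.List.pyGet? l 0 = some 'C' :=
          (pv_head_startswith l 'C').mpr hc
        simp only [pvALoop, if_pos hg, List.nil_append, pvALoop_some, List.takeWhile_cons,
          List.dropWhile_cons, hc, Bool.not_true, Bool.false_eq_true, if_false,
          List.filter_nil]
        rw [pvBlockLoop]
        simp only [pvInnerLoop_spec rest [], List.nil_append, PySem.Chars.join_nil]
        simp only [List.map_eq_nil_iff]
        split_ifs <;> simp
      · have hc' : ¬ (0 < PySem.List.len l ∧ PySem.List.pyGet? l 0 = some 'C') := by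
          rw [pv_head_startswith]; simpa [pvIsC] using hc
        by_cases hd : pvIsD l = true
        · have hg : 0 < PySem.List.len l ∧ PySem.List.pyGet? l 0 = some 'D' :=
            (pv_head_startswith l 'D').mpr hd
          simp only [pvALoop, if_neg hc', if_pos hg.1, if_pos hg.2, ih, List.takeWhile_cons,
            hc, Bool.not_false, if_true, List.dropWhile_cons, List.filter_cons, hd]
          simp only [Bool.false_eq_true, if_false, ite_true, reduceCtorEq, List.cons_ne_nil]
          split_ifs <;> ring_nf
        · have hd' : pvIsD l = false := by simpa using hd
          have hgd : ¬ PySem.List.pyGet? l 0 = some 'D' ∨ ¬ 0 < PySem.List.len l := by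
            by_cases hl : 0 < PySem.List.len l
            · left; intro hh; exact absurd ((pv_head_startswith l 'D').mp ⟨hl, hh⟩) hd
            · right; exact hl
          have step : pvALoop (l :: rest) cp none num nd ind =
              pvALoop rest cp none num nd ind := by
            simp only [pvALoop]
            split_ifs <;> first | rfl | tauto
          rw [step, ih]
          simp [List.takeWhile_cons, hc, List.dropWhile_cons, List.filter_cons, hd']

-- ===== VERDICT (by name: the statement is the Claim_ definition above) =====
theorem create_phrases_spec : Claim_equal_create_phrases := by
  intro scene _
  unfold Spec_create_phrases create_phrases create_phrases_alt
  rw [pvALoop_none]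
  simp only [pvPreLoop_spec, Bool.false_or]
  have hiff : (List.filter pvIsD
        (List.takeWhile (fun l => !pvIsC l) (PySem.Chars.splitOn scene.toList ['\n'])) = []) ↔
      ((List.takeWhile (fun l => !pvIsC l)
        (PySem.Chars.splitOn scene.toList ['\n'])).any pvIsD = false) := by
    rw [List.filter_eq_nil_iff, List.any_eq_false]
  by_cases h : (List.takeWhile (fun l => !pvIsC l)
      (PySem.Chars.splitOn scene.toList ['\n'])).any pvIsD = true
  · have hne : ¬ (List.filter pvIsD
        (List.takeWhile (fun l => !pvIsC l) (PySem.Chars.splitOn scene.toList ['\n'])) = []) := by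
      rw [hiff]; simp [h]
    simp [h, hne]
  · have hfalse : (List.takeWhile (fun l => !pvIsC l)
        (PySem.Chars.splitOn scene.toList ['\n'])).any pvIsD = false := by simpa using h
    have hnil := hiff.mpr hfalse
    simp [hfalse, hnil]
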